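-- pv_equiv track=rewrite | github.com/GiggleLiu/BPDecoderPlus | python/generate_diagrams.py | generate_ascii_surface_code
-- ===== SOURCE A (Python) =====
-- def generate_ascii_surface_code(distance: int = 3):
--     """Generate ASCII art of surface code layout."""
--
--     lines = []
--     lines.append(f"Rotated Surface Code (d={distance})")
--     lines.append("")
--
--     # Generate grid
--     # Data qubits: O, X-stabilizers: X, Z-stabilizers: Z
--     for row in range(2 * distance + 1):
--         line = ""
--         for col in range(2 * distance + 1):
--             if row % 2 == 1 and col % 2 == 1:
--                 # Data qubit positions
--                 line += "◯ "
--             elif row % 2 == 0 and col % 2 == 0: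
--                 # Stabilizer positions
--                 if (row // 2 + col // 2) % 2 == 0:
--                     if 0 < row < 2 * distance and 0 < col < 2 * distance:
--                         line += "X "
--                     else:
--                         line += "  "
--                 else:
--                     if 0 < row < 2 * distance and 0 < col < 2 * distance:
--                         line += "Z "
--                     else:
--                         line += "  "
--             else:
--                 line += "  "
--         lines.append(line)
--
--     lines.append("")
--     lines.append("Legend: ◯ = Data qubit, X = X-stabilizer, Z = Z-stabilizer")
--
--     return "\n".join(lines)
-- ===== SOURCE B (Python) =====
-- def generate_ascii_surface_code(distance: int = 3):
--     """Generate ASCII art of surface code layout (grid filled by qubit category)."""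
--     n = 2 * distance + 1
--     grid = [["  "] * n for _ in range(n)]
--     # data qubits: every odd row / odd column cell
--     for r in range(1, n, 2):
--         for c in range(1, n, 2):
--             grid[r][c] = "\u25ef "
--     # stabilizers: interior even row / even column cells, checkerboard X/Z
--     for r in range(2, 2 * distance, 2):
--         for c in range(2, 2 * distance, 2):
--             grid[r][c] = "X " if (r // 2 + c // 2) % 2 == 0 else "Z "
--     body = ["".join(row) for row in grid]
--     header = "Rotated Surface Code (d=%d)" % distance
--     legend = "Legend: \u25ef = Data qubit, X = X-stabilizer, Z = Z-stabilizer"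
--     return "\n".join([header, ""] + body + ["", legend])
-- ===== Notes on version B (the rewrite author's own statement) =====
-- stated objective: alternative
-- what changed: Instead of classifying every cell inline while concatenating each line left-to-right, B allocates a blank square grid of two-character cells and fills it in two separate passes (odd-row/odd-column data qubits, then interior even/even stabilizers checkerboarded) before joining the rows.
import Mathlib
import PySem

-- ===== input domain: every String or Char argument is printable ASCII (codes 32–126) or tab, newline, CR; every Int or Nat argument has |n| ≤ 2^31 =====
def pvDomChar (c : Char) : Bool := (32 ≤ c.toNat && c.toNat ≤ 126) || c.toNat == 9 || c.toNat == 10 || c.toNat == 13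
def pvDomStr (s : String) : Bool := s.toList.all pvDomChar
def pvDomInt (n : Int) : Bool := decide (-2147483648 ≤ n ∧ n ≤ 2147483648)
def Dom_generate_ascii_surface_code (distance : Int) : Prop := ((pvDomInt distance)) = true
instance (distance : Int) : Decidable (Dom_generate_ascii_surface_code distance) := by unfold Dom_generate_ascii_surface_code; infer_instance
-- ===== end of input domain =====

-- B fills a blank (2d+1)x(2d+1) grid of 2-char cells in two category passes (data qubits, then
-- interior stabilizers) and joins rows, instead of A's inline per-cell classification while
-- concatenating each line; same output, stated as an alternative decomposition.


-- ===== PORT A =====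
def generate_ascii_surface_code (distance : Int) : String :=
  let lines : List String := ["Rotated Surface Code (d=" ++ PySem.Int.toStr distance ++ ")", ""]
  let lines := (PySem.List.pyRange 0 (2 * distance + 1) 1).foldl (fun lines row =>
    let line := (PySem.List.pyRange 0 (2 * distance + 1) 1).foldl (fun line col =>
      if PySem.Int.mod row 2 = 1 ∧ PySem.Int.mod col 2 = 1 then
        line ++ "◯ "
      else if PySem.Int.mod row 2 = 0 ∧ PySem.Int.mod col 2 = 0 then
        if PySem.Int.mod (PySem.Int.floordiv row 2 + PySem.Int.floordiv col 2) 2 = 0 then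
          if 0 < row ∧ row < 2 * distance ∧ 0 < col ∧ col < 2 * distance then line ++ "X "
          else line ++ "  "
        else
          if 0 < row ∧ row < 2 * distance ∧ 0 < col ∧ col < 2 * distance then line ++ "Z "
          else line ++ "  "
      else
        line ++ "  ") ""
    lines ++ [line]) lines
  let lines := lines ++ ["", "Legend: ◯ = Data qubit, X = X-stabilizer, Z = Z-stabilizer"]
  PySem.Str.join "\n" lines

-- ===== PORT B =====
-- python 'grid[r][c] = v' (r, c are always in range and nonnegative where B uses it)
def pvSetCell (g : List (List String)) (r c : Int) (v : String) : List (List String) :=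
  g.set r.toNat ((g.getD r.toNat []).set c.toNat v)

def generate_ascii_surface_code_alt (distance : Int) : String :=
  let n := 2 * distance + 1
  let grid : List (List String) :=
    (PySem.List.pyRange 0 n 1).map (fun _ => (PySem.List.pyRange 0 n 1).map (fun _ => "  "))
  let grid := (PySem.List.pyRange 1 n 2).foldl (fun g r =>
    (PySem.List.pyRange 1 n 2).foldl (fun g c => pvSetCell g r c "◯ ") g) grid
  let grid := (PySem.List.pyRange 2 (2 * distance) 2).foldl (fun g r =>
    (PySem.List.pyRange 2 (2 * distance) 2).foldl (fun g c =>
      pvSetCell g r c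
        (if PySem.Int.mod (PySem.Int.floordiv r 2 + PySem.Int.floordiv c 2) 2 = 0 then "X "
         else "Z ")) g) grid
  let body := grid.map (fun row => PySem.Str.join "" row)
  let header := "Rotated Surface Code (d=" ++ PySem.Int.toStr distance ++ ")"
  let legend := "Legend: ◯ = Data qubit, X = X-stabilizer, Z = Z-stabilizer"
  PySem.Str.join "\n" ([header, ""] ++ body ++ ["", legend])

-- ===== PRECONDITION & SPEC =====
def Spec_generate_ascii_surface_code (distance : Int) (out : String) : Prop := out = generate_ascii_surface_code_alt distance
instance (distance : Int) (out : String) : Decidable (Spec_generate_ascii_surface_code distance out) := by unfold Spec_generate_ascii_surface_code; infer_instance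

-- ===== CLAIM (what is proved, stated in full; the proofs are below) =====
def Claim_equal_generate_ascii_surface_code : Prop := ∀ (distance : Int), Dom_generate_ascii_surface_code distance → Spec_generate_ascii_surface_code distance (generate_ascii_surface_code distance)

-- ===== LEMMAS AND PROOFS =====

-- A's per-cell string, factored out of its inner loop body
def pvCell (d r c : Int) : String :=
  if PySem.Int.mod r 2 = 1 ∧ PySem.Int.mod c 2 = 1 then "◯ "
  else if PySem.Int.mod r 2 = 0 ∧ PySem.Int.mod c 2 = 0 then
    if PySem.Int.mod (PySem.Int.floordiv r 2 + PySem.Int.floordiv c 2) 2 = 0 then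
      if 0 < r ∧ r < 2 * d ∧ 0 < c ∧ c < 2 * d then "X " else "  "
    else
      if 0 < r ∧ r < 2 * d ∧ 0 < c ∧ c < 2 * d then "Z " else "  "
  else "  "

lemma pv_intercalate_nil_cons (a : List Char) (l : List (List Char)) :
    List.intercalate [] (a :: l) = a ++ List.intercalate [] l := by
  induction l <;> simp_all [List.intercalate, List.intersperse]

lemma pv_join_empty_cons (x : String) (xs : List String) :
    PySem.Str.join "" (x :: xs) = x ++ PySem.Str.join "" xs := by
  simp [PySem.Str.join, PySem.Chars.join, pv_intercalate_nil_cons, String.ofList_append]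

lemma pv_foldl_str (f : Int → String) (l : List Int) (a : String) :
    l.foldl (fun acc x => acc ++ f x) a = a ++ PySem.Str.join "" (l.map f) := by
  induction l generalizing a with
  | nil => simp [PySem.Str.join, PySem.Chars.join, List.intercalate]
  | cons x xs ih => simp [ih, pv_join_empty_cons, String.append_assoc]

lemma pv_lineA (d r : Int) (l : List Int) (a : String) :
    l.foldl (fun line col =>
      if PySem.Int.mod r 2 = 1 ∧ PySem.Int.mod col 2 = 1 then
        line ++ "◯ "
      else if PySem.Int.mod r 2 = 0 ∧ PySem.Int.mod col 2 = 0 then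
        if PySem.Int.mod (PySem.Int.floordiv r 2 + PySem.Int.floordiv col 2) 2 = 0 then
          if 0 < r ∧ r < 2 * d ∧ 0 < col ∧ col < 2 * d then line ++ "X "
          else line ++ "  "
        else
          if 0 < r ∧ r < 2 * d ∧ 0 < col ∧ col < 2 * d then line ++ "Z "
          else line ++ "  "
      else
        line ++ "  ") a
    = a ++ PySem.Str.join "" (l.map (pvCell d r)) := by
  have h : (fun line col =>
      if PySem.Int.mod r 2 = 1 ∧ PySem.Int.mod col 2 = 1 then
        line ++ "◯ "
      else if PySem.Int.mod r 2 = 0 ∧ PySem.Int.mod col 2 = 0 then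
        if PySem.Int.mod (PySem.Int.floordiv r 2 + PySem.Int.floordiv col 2) 2 = 0 then
          if 0 < r ∧ r < 2 * d ∧ 0 < col ∧ col < 2 * d then line ++ "X "
          else line ++ "  "
        else
          if 0 < r ∧ r < 2 * d ∧ 0 < col ∧ col < 2 * d then line ++ "Z "
          else line ++ "  "
      else
        line ++ "  ") = fun (line : String) col => line ++ pvCell d r col := by
    funext line col
    simp only [pvCell]
    split_ifs <;> rfl
  rw [h, pv_foldl_str]

-- normal form shared by both sides
def pvNormal (d : Int) : String :=
  PySem.Str.join "\n"
    (["Rotated Surface Code (d=" ++ PySem.Int.toStr d ++ ")", ""]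
      ++ (PySem.List.pyRange 0 (2 * d + 1) 1).map
           (fun r => PySem.Str.join "" ((PySem.List.pyRange 0 (2 * d + 1) 1).map (pvCell d r)))
      ++ ["", "Legend: ◯ = Data qubit, X = X-stabilizer, Z = Z-stabilizer"])

lemma pv_A_eq (d : Int) : generate_ascii_surface_code d = pvNormal d := by
  simp only [generate_ascii_surface_code, pvNormal]
  rw [PySem.List.foldl_append_singleton_eq_map]
  simp only [pv_lineA]
  simp

lemma pv_set_getD_self (g : List (List String)) (k : Nat) :
    g.set k (g.getD k []) = g := by
  apply List.ext_getElem?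
  intro i
  rw [List.getElem?_set]
  by_cases h : k = i
  · subst h
    by_cases hk : k < g.length
    · simp [hk, List.getD, List.getElem?_eq_getElem hk]
    · simp [hk, List.getElem?_eq_none (by omega : g.length ≤ k)]
  · simp [h]

lemma pv_getD_set (g : List (List String)) (k : Nat) (a : List String) :
    (g.set k a).getD k [] = if k < g.length then a else g.getD k [] := by
  by_cases hk : k < g.length <;> simp [List.getD, List.getElem?_set, hk]

lemma pv_inner_eq (v : Int → String) (cs : List Int) (g : List (List String)) (r : Int) :
    cs.foldl (fun g c => pvSetCell g r c (v c)) g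
      = g.set r.toNat (cs.foldl (fun row c => row.set c.toNat (v c)) (g.getD r.toNat [])) := by
  induction cs generalizing g with
  | nil => simp only [List.foldl_nil]; exact (pv_set_getD_self g r.toNat).symm
  | cons c cs ih =>
    simp only [List.foldl_cons]
    rw [ih]
    unfold pvSetCell
    rw [List.set_set, pv_getD_set]
    by_cases hk : r.toNat < g.length
    · simp [hk]
    · have hlen : g.length ≤ r.toNat := Nat.le_of_not_lt hk
      have : g.getD r.toNat [] = [] := by
        simp [List.getD, List.getElem?_eq_none (by omega : g.length ≤ r.toNat)]
      simp [hk, this]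

lemma pv_rowfold_getElem (v : Int → String) (cs : List Int) (h0 : ∀ c ∈ cs, 0 ≤ c)
    (row : List String) (j : Nat) :
    (cs.foldl (fun row c => row.set c.toNat (v c)) row)[j]?
      = if (j : Int) ∈ cs then (if j < row.length then some (v j) else none) else row[j]? := by
  induction cs generalizing row with
  | nil => simp
  | cons c cs ih =>
    have hc : 0 ≤ c := h0 c (by simp)
    simp only [List.foldl_cons]
    rw [ih (fun x hx => h0 x (List.mem_cons_of_mem _ hx))]
    by_cases hmem : (j : Int) ∈ cs
    · simp [hmem, List.mem_cons]
    · by_cases hcj : c = (j : Int)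
      · have : c.toNat = j := by omega
        simp [hmem, hcj, List.getElem?_set, this]
      · have : c.toNat ≠ j := by omega
        simp [hmem, List.getElem?_set, this]
        intro h; exact absurd h.symm hcj

lemma pv_gridfold_getElem (F : Int → List String → List String) (rs : List Int)
    (hnd : rs.Nodup) (h0 : ∀ r ∈ rs, 0 ≤ r) (g : List (List String)) (i : Nat) :
    (rs.foldl (fun g r => g.set r.toNat (F r (g.getD r.toNat []))) g)[i]?
      = if (i : Int) ∈ rs then g[i]?.map (F i) else g[i]? := by
  induction rs generalizing g with
  | nil => simp
  | cons r rs ih =>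
    have hr : 0 ≤ r := h0 r (by simp)
    simp only [List.foldl_cons]
    rw [ih hnd.of_cons (fun x hx => h0 x (List.mem_cons_of_mem _ hx))]
    by_cases hmem : (i : Int) ∈ rs
    · have hri : r ≠ (i : Int) := fun h => (List.nodup_cons.mp hnd).1 (h ▸ hmem)
      have : r.toNat ≠ i := by omega
      simp [hmem, List.getElem?_set, this, List.mem_cons]
    · by_cases hri : r = (i : Int)
      · have hti : r.toNat = i := by omega
        by_cases hi : i < g.length
        · simp [hmem, hri, List.getElem?_set, hti, hi, List.getD,
            List.getElem?_eq_getElem hi]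
        · simp [hmem, hri, List.getElem?_set, hti, hi,
            List.getElem?_eq_none (by omega : g.length ≤ i)]
      · have : r.toNat ≠ i := by omega
        simp [hmem, List.getElem?_set, this]
        intro h; exact absurd h.symm hri

lemma pv_nodup_pyRange2 (a b : Int) : (PySem.List.pyRange a b 2).Nodup := by
  rw [PySem.List.pyRange_of_pos a b (by norm_num)]
  exact List.nodup_range.map (fun x y h => by omega)

lemma pv_mem_pyRange2 (a b x : Int) :
    x ∈ PySem.List.pyRange a b 2 ↔ a ≤ x ∧ x < b ∧ 2 ∣ x - a := by
  exact PySem.List.mem_pyRange_iff_of_pos (by norm_num) x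

lemma pv_cell_val (d i j : Int) :
    pvCell d i j =
      if 2 ∣ i - 1 ∧ 2 ∣ j - 1 then "◯ "
      else if (2 ≤ i ∧ i < 2 * d ∧ 2 ∣ i - 2) ∧ (2 ≤ j ∧ j < 2 * d ∧ 2 ∣ j - 2) then
        (if PySem.Int.mod (PySem.Int.floordiv i 2 + PySem.Int.floordiv j 2) 2 = 0 then "X "
         else "Z ")
      else "  " := by
  unfold pvCell
  simp only [PySem.Int.mod_eq_emod_of_pos (show (0:Int) < 2 by norm_num)]
  split_ifs <;> first | rfl | omega

lemma pv_row_odd (d i : Int) (hd : 0 ≤ d) (hodd : 2 ∣ i - 1) :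
    (PySem.List.pyRange 1 (2 * d + 1) 2).foldl (fun row c => row.set c.toNat "◯ ")
        ((PySem.List.pyRange 0 (2 * d + 1) 1).map (fun _ => "  "))
      = (PySem.List.pyRange 0 (2 * d + 1) 1).map (pvCell d i) := by
  apply List.ext_getElem?
  intro j
  rw [pv_rowfold_getElem (fun _ => "◯ ") _
        (fun c hc => ((pv_mem_pyRange2 _ _ c).mp hc).1.trans' (by norm_num))]
  by_cases hj : j < (2 * d + 1).toNat
  · have hjN : (j : Int) < 2 * d + 1 := by omega
    simp only [List.getElem?_map, PySem.List.getElem?_pyRange_one, List.length_map,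
      PySem.List.length_pyRange_one, pv_mem_pyRange2, Option.map_some]
    have hlt : j < (2 * d + 1 - 0).toNat := by omega
    simp only [if_pos hlt]
    simp only [Option.map_some]
    rw [pv_cell_val d i _]
    by_cases hm : (1 ≤ (j:Int) ∧ (j:Int) < 2 * d + 1 ∧ 2 ∣ (j:Int) - 1)
    · simp only [if_pos hm]
      have e1 : (2 ∣ i - 1 ∧ 2 ∣ (0 + (j:Int)) - 1) := by omega
      rw [if_pos e1]
    · simp only [if_neg hm]
      have h1 : ¬(2 ∣ i - 1 ∧ 2 ∣ (0 + (j:Int)) - 1) := by omega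
      have h2 : ¬((2 ≤ i ∧ i < 2 * d ∧ 2 ∣ i - 2) ∧
          (2 ≤ 0 + (j:Int) ∧ 0 + (j:Int) < 2 * d ∧ 2 ∣ (0 + (j:Int)) - 2)) := by omega
      rw [if_neg h1, if_neg h2]
  · have h1 : ((PySem.List.pyRange 0 (2 * d + 1) 1).map (fun _ => "  ") : List String)[j]? = none := by
      apply List.getElem?_eq_none
      simp [PySem.List.length_pyRange_one]; omega
    have h2 : ((PySem.List.pyRange 0 (2 * d + 1) 1).map (pvCell d i))[j]? = none := by
      apply List.getElem?_eq_none
      simp [PySem.List.length_pyRange_one]; omega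
    rw [h1, h2]
    have : ¬((j:Int) ∈ PySem.List.pyRange 1 (2 * d + 1) 2) := by
      rw [pv_mem_pyRange2]; omega
    simp [this]

lemma pv_row_even (d i : Int) (hd : 0 ≤ d) (hev : 2 ≤ i ∧ i < 2 * d ∧ 2 ∣ i - 2) :
    (PySem.List.pyRange 2 (2 * d) 2).foldl (fun row c => row.set c.toNat
        (if PySem.Int.mod (PySem.Int.floordiv i 2 + PySem.Int.floordiv c 2) 2 = 0 then "X "
         else "Z "))
        ((PySem.List.pyRange 0 (2 * d + 1) 1).map (fun _ => "  "))
      = (PySem.List.pyRange 0 (2 * d + 1) 1).map (pvCell d i) := by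
  apply List.ext_getElem?
  intro j
  rw [pv_rowfold_getElem _ _
        (fun c hc => ((pv_mem_pyRange2 _ _ c).mp hc).1.trans' (by norm_num))]
  by_cases hj : j < (2 * d + 1).toNat
  · have hjN : (j : Int) < 2 * d + 1 := by omega
    simp only [List.getElem?_map, PySem.List.getElem?_pyRange_one, List.length_map,
      PySem.List.length_pyRange_one, pv_mem_pyRange2, Option.map_some]
    have hlt : j < (2 * d + 1 - 0).toNat := by omega
    simp only [if_pos hlt]
    simp only [Option.map_some]
    rw [pv_cell_val d i _]
    by_cases hm : (2 ≤ (j:Int) ∧ (j:Int) < 2 * d ∧ 2 ∣ (j:Int) - 2)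
    · simp only [if_pos hm]
      have h1 : ¬(2 ∣ i - 1 ∧ 2 ∣ (0 + (j:Int)) - 1) := by omega
      have h2 : (2 ≤ i ∧ i < 2 * d ∧ 2 ∣ i - 2) ∧
          (2 ≤ 0 + (j:Int) ∧ 0 + (j:Int) < 2 * d ∧ 2 ∣ (0 + (j:Int)) - 2) := by omega
      simp only [if_neg h1, if_pos h2]
      have : (0 : Int) + (j:Int) = (j:Int) := by omega
      rw [this]
    · simp only [if_neg hm]
      have h1 : ¬(2 ∣ i - 1 ∧ 2 ∣ (0 + (j:Int)) - 1) := by omega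
      have h2 : ¬((2 ≤ i ∧ i < 2 * d ∧ 2 ∣ i - 2) ∧
          (2 ≤ 0 + (j:Int) ∧ 0 + (j:Int) < 2 * d ∧ 2 ∣ (0 + (j:Int)) - 2)) := by omega
      rw [if_neg h1, if_neg h2]
  · have h1 : ((PySem.List.pyRange 0 (2 * d + 1) 1).map (fun _ => "  ") : List String)[j]? = none := by
      apply List.getElem?_eq_none
      simp [PySem.List.length_pyRange_one]; omega
    have h2 : ((PySem.List.pyRange 0 (2 * d + 1) 1).map (pvCell d i))[j]? = none := by
      apply List.getElem?_eq_none
      simp [PySem.List.length_pyRange_one]; omega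
    rw [h1, h2]
    have : ¬((j:Int) ∈ PySem.List.pyRange 2 (2 * d) 2) := by
      rw [pv_mem_pyRange2]; omega
    simp [this]

lemma pv_row_blank (d i : Int) (hn1 : ¬2 ∣ i - 1)
    (hn2 : ¬(2 ≤ i ∧ i < 2 * d ∧ 2 ∣ i - 2)) :
    ((PySem.List.pyRange 0 (2 * d + 1) 1).map (fun _ => "  ") : List String)
      = (PySem.List.pyRange 0 (2 * d + 1) 1).map (pvCell d i) := by
  apply List.map_congr_left
  intro c hc
  have hc' := (PySem.List.mem_pyRange_one.mp hc)
  rw [pv_cell_val d i c]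
  have h1 : ¬(2 ∣ i - 1 ∧ 2 ∣ c - 1) := by omega
  have h2 : ¬((2 ≤ i ∧ i < 2 * d ∧ 2 ∣ i - 2) ∧ (2 ≤ c ∧ c < 2 * d ∧ 2 ∣ c - 2)) := by omega
  rw [if_neg h1, if_neg h2]

lemma pv_two_pass (F1 F2 : Int → List String → List String) (rs1 rs2 : List Int)
    (hnd1 : rs1.Nodup) (hnd2 : rs2.Nodup) (h01 : ∀ r ∈ rs1, 0 ≤ r) (h02 : ∀ r ∈ rs2, 0 ≤ r)
    (g : List (List String)) (k : Nat) :
    ((rs2.foldl (fun g r => g.set r.toNat (F2 r (g.getD r.toNat [])))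
        (rs1.foldl (fun g r => g.set r.toNat (F1 r (g.getD r.toNat []))) g)))[k]?
      = if (k : Int) ∈ rs2 then
          ((if (k : Int) ∈ rs1 then g[k]?.map (F1 k) else g[k]?).map (F2 k))
        else (if (k : Int) ∈ rs1 then g[k]?.map (F1 k) else g[k]?) := by
  rw [pv_gridfold_getElem F2 rs2 hnd2 h02, pv_gridfold_getElem F1 rs1 hnd1 h01]

lemma pv_grid_eq (d : Int) (hd : 0 ≤ d) :
    ((PySem.List.pyRange 2 (2 * d) 2).foldl (fun g r =>
        (PySem.List.pyRange 2 (2 * d) 2).foldl (fun g c =>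
          pvSetCell g r c
            (if PySem.Int.mod (PySem.Int.floordiv r 2 + PySem.Int.floordiv c 2) 2 = 0 then "X "
             else "Z ")) g)
      ((PySem.List.pyRange 1 (2 * d + 1) 2).foldl (fun g r =>
        (PySem.List.pyRange 1 (2 * d + 1) 2).foldl (fun g c => pvSetCell g r c "◯ ") g)
        ((PySem.List.pyRange 0 (2 * d + 1) 1).map
          (fun _ => (PySem.List.pyRange 0 (2 * d + 1) 1).map (fun _ => "  ")))))
    = (PySem.List.pyRange 0 (2 * d + 1) 1).map
        (fun r => (PySem.List.pyRange 0 (2 * d + 1) 1).map (pvCell d r)) := by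
  have e1 : (fun (g : List (List String)) (r : Int) =>
      (PySem.List.pyRange 1 (2 * d + 1) 2).foldl (fun g c => pvSetCell g r c "◯ ") g)
    = (fun (g : List (List String)) (r : Int) => g.set r.toNat
        ((fun (r : Int) (row : List String) =>
          (PySem.List.pyRange 1 (2 * d + 1) 2).foldl (fun row c => row.set c.toNat "◯ ") row)
          r (g.getD r.toNat []))) := by
    funext g r; exact pv_inner_eq (fun _ => "◯ ") _ g r
  have e2 : (fun (g : List (List String)) (r : Int) =>
      (PySem.List.pyRange 2 (2 * d) 2).foldl (fun g c =>
        pvSetCell g r c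
          (if PySem.Int.mod (PySem.Int.floordiv r 2 + PySem.Int.floordiv c 2) 2 = 0 then "X "
           else "Z ")) g)
    = (fun (g : List (List String)) (r : Int) => g.set r.toNat
        ((fun (r : Int) (row : List String) =>
          (PySem.List.pyRange 2 (2 * d) 2).foldl (fun row c => row.set c.toNat
            (if PySem.Int.mod (PySem.Int.floordiv r 2 + PySem.Int.floordiv c 2) 2 = 0 then "X "
             else "Z ")) row)
          r (g.getD r.toNat []))) := by
    funext g r
    exact pv_inner_eq
      (fun c => if PySem.Int.mod (PySem.Int.floordiv r 2 + PySem.Int.floordiv c 2) 2 = 0 then "X "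
                else "Z ") _ g r
  rw [e1, e2]
  apply List.ext_getElem?
  intro k
  rw [pv_two_pass
        (fun r row => List.foldl (fun row c => row.set c.toNat "◯ ") row
          (PySem.List.pyRange 1 (2 * d + 1) 2))
        (fun r row => List.foldl (fun row c => row.set c.toNat
            (if PySem.Int.mod (PySem.Int.floordiv r 2 + PySem.Int.floordiv c 2) 2 = 0 then "X "
             else "Z ")) row
          (PySem.List.pyRange 2 (2 * d) 2))
        (PySem.List.pyRange 1 (2 * d + 1) 2)
        (PySem.List.pyRange 2 (2 * d) 2)
        (pv_nodup_pyRange2 _ _) (pv_nodup_pyRange2 _ _)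
        (fun r hr => by have := (pv_mem_pyRange2 _ _ r).mp hr; omega)
        (fun r hr => by have := (pv_mem_pyRange2 _ _ r).mp hr; omega)]
  by_cases hk : k < (2 * d + 1).toNat
  · have hg0 : ((PySem.List.pyRange 0 (2 * d + 1) 1).map
        (fun _ => (PySem.List.pyRange 0 (2 * d + 1) 1).map (fun _ => "  ")) :
          List (List String))[k]?
        = some ((PySem.List.pyRange 0 (2 * d + 1) 1).map (fun _ => "  ")) := by
      simp only [List.getElem?_map, PySem.List.getElem?_pyRange_one]
      rw [if_pos (by omega : k < (2 * d + 1 - 0).toNat)]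
      rfl
    have hR : ((PySem.List.pyRange 0 (2 * d + 1) 1).map
        (fun r => (PySem.List.pyRange 0 (2 * d + 1) 1).map (pvCell d r)))[k]?
        = some ((PySem.List.pyRange 0 (2 * d + 1) 1).map (pvCell d (k : Int))) := by
      simp only [List.getElem?_map, PySem.List.getElem?_pyRange_one]
      rw [if_pos (by omega : k < (2 * d + 1 - 0).toNat)]
      simp only [Option.map_some]
      norm_num
    rw [hg0, hR]
    by_cases hm1 : ((k : Int) ∈ PySem.List.pyRange 1 (2 * d + 1) 2)
    · have hodd := (pv_mem_pyRange2 _ _ _).mp hm1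
      have hm2 : ¬((k : Int) ∈ PySem.List.pyRange 2 (2 * d) 2) := by
        rw [pv_mem_pyRange2]; omega
      rw [if_neg hm2, if_pos hm1]
      simp only [Option.map_some]
      rw [pv_row_odd d (k : Int) hd (by omega)]
    · by_cases hm2 : ((k : Int) ∈ PySem.List.pyRange 2 (2 * d) 2)
      · have hev := (pv_mem_pyRange2 _ _ _).mp hm2
        rw [if_pos hm2, if_neg hm1]
        simp only [Option.map_some]
        rw [pv_row_even d (k : Int) hd (by omega)]
      · rw [if_neg hm2, if_neg hm1]
        have hn1 : ¬(2 ∣ (k : Int) - 1) := by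
          intro hdvd
          exact hm1 ((pv_mem_pyRange2 _ _ _).mpr ⟨by omega, by omega, hdvd⟩)
        have hn2 : ¬(2 ≤ (k : Int) ∧ (k : Int) < 2 * d ∧ 2 ∣ (k : Int) - 2) := by
          intro hc
          exact hm2 ((pv_mem_pyRange2 _ _ _).mpr ⟨hc.1, hc.2.1, hc.2.2⟩)
        rw [pv_row_blank d (k : Int) hn1 hn2]
  · have hL : ((PySem.List.pyRange 0 (2 * d + 1) 1).map
        (fun _ => (PySem.List.pyRange 0 (2 * d + 1) 1).map (fun _ => "  ")) :
          List (List String))[k]? = none :=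
      List.getElem?_eq_none (by simp [PySem.List.length_pyRange_one]; omega)
    rw [hL]
    have hR : ((PySem.List.pyRange 0 (2 * d + 1) 1).map
        (fun r => (PySem.List.pyRange 0 (2 * d + 1) 1).map (pvCell d r)))[k]? = none :=
      List.getElem?_eq_none (by simp [PySem.List.length_pyRange_one]; omega)
    rw [hR]
    simp

lemma pv_B_eq (d : Int) : generate_ascii_surface_code_alt d = pvNormal d := by
  by_cases hd : 0 ≤ d
  · simp only [generate_ascii_surface_code_alt, pvNormal]
    rw [pv_grid_eq d hd]
    simp [List.map_map, Function.comp_def]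
  · have h0 : PySem.List.pyRange 0 (2 * d + 1) 1 = [] :=
      PySem.List.pyRange_one_eq_nil (by omega)
    have h1 : PySem.List.pyRange 1 (2 * d + 1) 2 = [] := by
      rw [PySem.List.pyRange_of_pos _ _ (by norm_num : (0:Int) < 2),
          if_neg (by omega : ¬(1:Int) < 2 * d + 1)]
      rfl
    have h2 : PySem.List.pyRange 2 (2 * d) 2 = [] := by
      rw [PySem.List.pyRange_of_pos _ _ (by norm_num : (0:Int) < 2),
          if_neg (by omega : ¬(2:Int) < 2 * d)]
      rfl
    simp [generate_ascii_surface_code_alt, pvNormal, h0, h1, h2]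

-- ===== VERDICT (by name: the statement is the Claim_ definition above) =====
theorem generate_ascii_surface_code_spec : Claim_equal_generate_ascii_surface_code := by
  intro d _
  unfold Spec_generate_ascii_surface_code
  rw [pv_A_eq, pv_B_eq]
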